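-- pv_equiv track=rewrite | github.com/szabgab/slides | python/examples/refactor/count_dna_bases.py | count
-- ===== SOURCE A (Python) =====
-- def count(items):
--
--     filt = [' ', '.', ',', ':']
--     items = list(filter(lambda x : x not in filt ,items))
--
--     diction = {}
--     for item in items:
--         if item in diction.keys():
--             diction[item] += 1
--         else:
--             diction[item] = 1
--     return(diction)
-- ===== SOURCE B (Python) =====
-- def count(items):
--     seps = (' ', '.', ',', ':')
--     xs = [x for x in items if x not in seps]
--     # group-by-first-occurrence via remove-and-continue: count the current head
--     # by how much the list shrinks when all its occurrences are removed,
--     # then continue on the remainder.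
--     result = {}
--     while xs:
--         head = xs[0]
--         rest = [x for x in xs if x != head]
--         result[head] = len(xs) - len(rest)
--         xs = rest
--     return result
-- ===== Notes on version B (the rewrite author's own statement) =====
-- stated objective: alternative
-- what changed: Replaced the single accumulating dict-update pass with a remove-and-continue grouping loop: count the current head by the length drop when all its occurrences are filtered out, then repeat on the remainder (no per-item dict lookups or updates).
import Mathlib
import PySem

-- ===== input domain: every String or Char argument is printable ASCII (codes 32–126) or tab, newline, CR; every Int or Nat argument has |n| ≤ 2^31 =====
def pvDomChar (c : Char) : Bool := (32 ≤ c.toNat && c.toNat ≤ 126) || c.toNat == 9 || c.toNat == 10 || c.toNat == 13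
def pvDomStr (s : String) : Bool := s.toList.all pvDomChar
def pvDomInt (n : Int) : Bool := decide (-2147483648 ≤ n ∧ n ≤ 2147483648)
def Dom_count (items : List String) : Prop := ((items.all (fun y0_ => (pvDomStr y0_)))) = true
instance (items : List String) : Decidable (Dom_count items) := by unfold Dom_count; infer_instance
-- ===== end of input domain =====

-- B replaces A's single accumulating dict-update pass by a remove-and-continue grouping
-- loop (count the current head by the length drop when all its occurrences are removed,
-- then repeat on the remainder); equal return value, dict compared as a mapping.

-- ===== PORT A =====
def count (items : List String) : List (String × Int) :=
  let filt : List String := [" ", ".", ",", ":"]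
  let items := items.filter (fun x => !(filt.contains x))
  let diction := items.foldl (fun d item =>
    if d.contains item then d.insert item (d.getD item 0 + 1)
    else d.insert item 1) (PySem.Dict.empty : PySem.Dict String Int)
  diction.items

-- ===== PORT B =====
def tallyB : List String → List (String × Int)
  | [] => []
  | x :: t =>
    let rest := (x :: t).filter (fun y => y ≠ x)
    (x, ((x :: t).length : Int) - (rest.length : Int)) :: tallyB rest
termination_by xs => xs.length
decreasing_by
  have h : ((x :: t).filter (fun y => decide (y ≠ x))).length ≤ t.length := by
    simp only [List.filter_cons, decide_not, ne_eq, decide_true, Bool.not_true,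
      Bool.false_eq_true, if_neg, not_false_iff]
    exact List.length_filter_le _ _
  simpa using Nat.lt_of_le_of_lt h (Nat.lt_succ_self _)

def count_alt (items : List String) : List (String × Int) :=
  let seps : List String := [" ", ".", ",", ":"]
  tallyB (items.filter (fun x => !(seps.contains x)))

-- ===== PRECONDITION & SPEC =====
def Spec_count (items : List String) (out : List (String × Int)) : Prop := out = count_alt items
instance (items : List String) (out : List (String × Int)) : Decidable (Spec_count items out) := by unfold Spec_count; infer_instance

-- ===== CLAIM =====
def Claim_equal_count : Prop := ∀ (items : List String), Dom_count items → Spec_count items (count items)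

-- ===== LEMMAS AND PROOFS =====

-- A's branching update is extensionally the unconditional "insert x (getD x 0 + 1)" update.
theorem count_fold_fun_eq :
    (fun (d : PySem.Dict String Int) (item : String) =>
      if d.contains item then d.insert item (d.getD item 0 + 1)
      else d.insert item 1)
    = (fun (d : PySem.Dict String Int) (x : String) => d.insert x (d.getD x 0 + 1)) := by
  funext d item
  by_cases h : d.contains item = true
  · simp [h]
  · simp [h, PySem.Dict.getD_of_not_contains d (k := item) 0 (by simpa using h)]

-- adding elements equal to one already in the set accumulator is a no-op
theorem foldl_add_filter_ne (t : List String) (s : List String) (x : String)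
    (hx : x ∈ s) :
    t.foldl PySem.Set.add s = (t.filter (fun y => y ≠ x)).foldl PySem.Set.add s := by
  induction t generalizing s with
  | nil => rfl
  | cons y t ih =>
    by_cases h : y = x
    · subst h
      simp only [List.filter_cons, decide_not, List.foldl_cons]
      have : PySem.Set.add s y = s := by simp [PySem.Set.add, hx]
      rw [this]
      simpa using ih s hx
    · simp only [List.filter_cons, decide_not]
      rw [show (!decide (y = x)) = true by simp [h]]
      simp only [List.foldl_cons, if_true]
      simp only [ne_eq, decide_not] at ih
      apply ih
      by_cases hy : y ∈ s
      · simpa [PySem.Set.add, hy] using hx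
      · simp [PySem.Set.add, hy]
        exact Or.inl hx

-- an element absent from the tail can be pulled out of the accumulator
theorem foldl_add_cons_head (t : List String) (s : List String) (x : String)
    (hx : x ∉ t) :
    t.foldl PySem.Set.add (x :: s) = x :: t.foldl PySem.Set.add s := by
  induction t generalizing s with
  | nil => rfl
  | cons y t ih =>
    have hyx : y ≠ x := fun h => hx (h ▸ List.mem_cons_self)
    have hxt : x ∉ t := fun h => hx (List.mem_cons_of_mem _ h)
    simp only [List.foldl_cons]
    by_cases hy : y ∈ s
    · have h1 : PySem.Set.add (x :: s) y = x :: s := by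
        simp [PySem.Set.add, hy]
      have h2 : PySem.Set.add s y = s := by simp [PySem.Set.add, hy]
      rw [h1, h2, ih s hxt]
    · have h1 : PySem.Set.add (x :: s) y = x :: (s ++ [y]) := by
        simp [PySem.Set.add, hy, hyx]
      have h2 : PySem.Set.add s y = s ++ [y] := by simp [PySem.Set.add, hy]
      rw [h1, h2, ih (s ++ [y]) hxt]

theorem ofList_cons_filter (x : String) (t : List String) :
    PySem.Set.ofList (x :: t)
      = x :: PySem.Set.ofList (t.filter (fun y => y ≠ x)) := by
  have h1 : PySem.Set.ofList (x :: t) = t.foldl PySem.Set.add [x] := by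
    rw [PySem.Set.ofList_eq_foldl]
    simp [PySem.Set.add]
  have h2 : PySem.Set.ofList (t.filter (fun y => y ≠ x))
      = (t.filter (fun y => y ≠ x)).foldl PySem.Set.add [] := PySem.Set.ofList_eq_foldl _
  rw [h1, foldl_add_filter_ne t [x] x (by simp),
      foldl_add_cons_head _ [] x (by simp), h2]

theorem count_filter_ne (t : List String) (x k : String) (hk : k ≠ x) :
    (t.filter (fun y => y ≠ x)).count k = t.count k := by
  induction t with
  | nil => rfl
  | cons y t ih =>
    by_cases h : y = x
    · subst h
      simp only [List.filter_cons, decide_not]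
      simp only [ne_eq, decide_not] at ih
      simp [List.count_cons, show (y == k) = false by simpa using fun h => hk h.symm, ih]
    · simp only [List.filter_cons, decide_not]
      rw [show (!decide (y = x)) = true by simp [h]]
      simp only [ne_eq, decide_not] at ih
      simp [List.count_cons, ih]

theorem length_filter_ne_nat (t : List String) (x : String) :
    (t.filter (fun y => y ≠ x)).length + t.count x = t.length := by
  induction t with
  | nil => simp
  | cons y t ih =>
    simp only [ne_eq, decide_not] at ih
    by_cases h : y = x
    · subst h
      simp
      omega
    · simp [h]
      omega

theorem tallyB_eq (xs : List String) :
    tallyB xs = (PySem.Set.ofList xs).map (fun k => (k, (xs.count k : Int))) := by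
  induction xs using tallyB.induct with
  | case1 => rw [tallyB]; rfl
  | case2 x t rest ih =>
    have hfx : (x :: t).filter (fun y => y ≠ x) = t.filter (fun y => y ≠ x) := by
      simp
    rw [tallyB, ofList_cons_filter x t]
    simp only [List.map_cons]
    refine congrArg₂ List.cons ?_ ?_
    · have hlen := length_filter_ne_nat t x
      have : ((x :: t).length : Int) - (((x :: t).filter (fun y => y ≠ x)).length : Int)
          = ((x :: t).count x : Int) := by
        rw [hfx]
        simp only [List.length_cons, List.count_cons, beq_self_eq_true, if_true]
        push_cast
        omega
      rw [this]
    · rw [ih]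
      have hrest : rest = t.filter (fun y => y ≠ x) := hfx
      rw [hrest]
      apply List.map_congr_left
      intro k hk
      have hkf : k ∈ t.filter (fun y => y ≠ x) := by
        simpa using (PySem.Set.mem_ofList _ _).1 hk
      have hkne : k ≠ x := by
        have := List.of_mem_filter hkf
        simpa using this
      have h1 : (t.filter (fun y => y ≠ x)).count k = t.count k :=
        count_filter_ne t x k hkne
      have h2 : (x :: t).count k = t.count k := by
        simp [List.count_cons, show (x == k) = false by simpa using fun h => hkne h.symm]
      rw [h1, h2]

-- ===== VERDICT =====
theorem count_spec : Claim_equal_count := by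
  intro items _
  unfold Spec_count count count_alt
  simp only [count_fold_fun_eq, PySem.Dict.foldl_insert_getD_add_one_eq_counter,
    PySem.Dict.items_counter]
  exact (tallyB_eq _).symm
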